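-- pv_equiv track=rewrite | github.com/jerbarnes/crosslingual_reordering | script/pos_reorderings_raw.py | head_tails
-- ===== SOURCE A (Python) =====
-- def head_tails (list_of_integers):
--     list2 = []
--     for element in list_of_integers:
--         if element+1 not in list_of_integers:
--             list2.append(element)
--         elif element-1 not in list_of_integers:
--             list2.append(element)
--     return list2
-- ===== SOURCE B (Python) =====
-- def head_tails(list_of_integers):
--     vals = sorted(set(list_of_integers))
--     last = len(vals) - 1
--     keep = {v for i, v in enumerate(vals)
--             if i == 0 or vals[i - 1] != v - 1
--             or i == last or vals[i + 1] != v + 1}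
--     return [x for x in list_of_integers if x in keep]
-- ===== Notes on version B (the rewrite author's own statement) =====
-- stated objective: faster
-- what changed: Replaced the per-element linear membership rescans of the whole list with sorting the distinct values once and scanning adjacent pairs of that sorted unique list for run boundaries, building a keeper set that the original list is then filtered through.
import Mathlib
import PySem

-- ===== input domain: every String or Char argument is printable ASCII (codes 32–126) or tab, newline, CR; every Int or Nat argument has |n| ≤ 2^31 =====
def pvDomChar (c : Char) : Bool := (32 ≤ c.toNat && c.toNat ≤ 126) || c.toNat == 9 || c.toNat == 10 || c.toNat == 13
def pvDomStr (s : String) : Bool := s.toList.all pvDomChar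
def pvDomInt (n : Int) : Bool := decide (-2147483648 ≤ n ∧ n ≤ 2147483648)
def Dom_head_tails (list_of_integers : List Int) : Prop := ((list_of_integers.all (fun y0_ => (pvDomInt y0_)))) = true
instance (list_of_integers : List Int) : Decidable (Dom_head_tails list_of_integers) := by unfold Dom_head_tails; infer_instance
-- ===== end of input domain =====

-- B replaces A's per-element rescans of the whole list with a sort of the distinct
-- values and a single boundary scan building a keeper set (objective: faster).


-- ===== PORT A =====
def head_tails (list_of_integers : List Int) : List Int :=
  list_of_integers.foldl (fun list2 element =>
    if (element + 1) ∉ list_of_integers then list2 ++ [element]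
    else if (element - 1) ∉ list_of_integers then list2 ++ [element]
    else list2) []

-- ===== PORT B =====
def head_tails_alt (list_of_integers : List Int) : List Int :=
  let vals := PySem.List.sorted (PySem.Set.ofList list_of_integers) (fun x => x) false
  let last : Int := (vals.length : Int) - 1
  let keep : PySem.Set Int := PySem.Set.ofList
    (((PySem.List.enumerate vals).filter (fun p =>
        p.1 == 0 || PySem.List.pyGetD vals (p.1 - 1) 0 != p.2 - 1 ||
        p.1 == last || PySem.List.pyGetD vals (p.1 + 1) 0 != p.2 + 1)).map (·.2))
  list_of_integers.filter (fun x => PySem.Set.contains keep x)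

-- ===== PRECONDITION & SPEC =====
def Spec_head_tails (list_of_integers : List Int) (out : List Int) : Prop := out = head_tails_alt list_of_integers
instance (list_of_integers : List Int) (out : List Int) : Decidable (Spec_head_tails list_of_integers out) := by unfold Spec_head_tails; infer_instance

-- ===== CLAIM (what is proved, stated in full; the proofs are below) =====
def Claim_equal_head_tails : Prop := ∀ (list_of_integers : List Int), Dom_head_tails list_of_integers → Spec_head_tails list_of_integers (head_tails list_of_integers)

-- ===== LEMMAS AND PROOFS =====

-- A is the filter of the input by "some neighbour value is missing".
lemma head_tails_eq_filter (l : List Int) :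
    head_tails l = l.filter (fun e => !(decide ((e + 1) ∈ l)) || !(decide ((e - 1) ∈ l))) := by
  unfold head_tails
  have hbody : (fun (list2 : List Int) (element : Int) =>
      if (element + 1) ∉ l then list2 ++ [element]
      else if (element - 1) ∉ l then list2 ++ [element]
      else list2)
      = (fun (list2 : List Int) (element : Int) =>
      if (!(decide ((element + 1) ∈ l)) || !(decide ((element - 1) ∈ l))) = true
      then list2 ++ [element] else list2) := by
    funext list2 element
    by_cases h1 : (element + 1) ∈ l <;> by_cases h2 : (element - 1) ∈ l <;> simp [h1, h2]
  rw [hbody, PySem.List.foldl_append_if_eq_filter]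
  simp

-- In a strictly increasing list, the value just below vals[k] is present iff it
-- sits at position k-1.
lemma prev_iff (vals : List Int) (h : vals.Pairwise (· < ·)) (k : Nat) (hk : k < vals.length) :
    (vals[k] - 1 ∈ vals) ↔ (k ≠ 0 ∧ PySem.List.pyGetD vals ((k : Int) - 1) 0 = vals[k] - 1) := by
  have hmono : ∀ (i j : Nat) (hi : i < vals.length) (hj : j < vals.length), i < j → vals[i] < vals[j] :=
    fun i j hi hj hij => (List.pairwise_iff_getElem.mp h) i j hi hj hij
  constructor
  · rintro hm
    obtain ⟨j, hj, hje⟩ := List.mem_iff_getElem.mp hm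
    have hjk : j < k := by
      by_contra hge
      rcases Nat.lt_or_ge k j with hlt | hge2
      · have := hmono k j hk hj hlt; omega
      · have : j = k := by omega
        subst this; omega
    have hk1 : k - 1 < vals.length := by omega
    have h1 : vals[j] ≤ vals[k - 1] := by
      rcases Nat.lt_or_ge j (k - 1) with hlt | hge
      · exact le_of_lt (hmono j (k - 1) hj hk1 hlt)
      · have : j = k - 1 := by omega
        subst this; exact le_refl _
    have h2 : vals[k - 1] < vals[k] := hmono (k - 1) k hk1 hk (by omega)
    refine ⟨by omega, ?_⟩
    have hc : (k : Int) - 1 = ((k - 1 : Nat) : Int) := by omega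
    rw [hc, PySem.List.pyGetD_natCast, List.getD_eq_getElem _ _ hk1]
    omega
  · rintro ⟨hk0, heq⟩
    have hk1 : k - 1 < vals.length := by omega
    have hc : (k : Int) - 1 = ((k - 1 : Nat) : Int) := by omega
    rw [hc, PySem.List.pyGetD_natCast, List.getD_eq_getElem _ _ hk1] at heq
    rw [← heq]; exact List.getElem_mem hk1

-- Mirror lemma for the value just above vals[k].
lemma next_iff (vals : List Int) (h : vals.Pairwise (· < ·)) (k : Nat) (hk : k < vals.length) :
    (vals[k] + 1 ∈ vals) ↔ (k ≠ vals.length - 1 ∧ PySem.List.pyGetD vals ((k : Int) + 1) 0 = vals[k] + 1) := by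
  have hmono : ∀ (i j : Nat) (hi : i < vals.length) (hj : j < vals.length), i < j → vals[i] < vals[j] :=
    fun i j hi hj hij => (List.pairwise_iff_getElem.mp h) i j hi hj hij
  constructor
  · rintro hm
    obtain ⟨j, hj, hje⟩ := List.mem_iff_getElem.mp hm
    have hkj : k < j := by
      by_contra hge
      rcases Nat.lt_or_ge j k with hlt | hge2
      · have := hmono j k hj hk hlt; omega
      · have : j = k := by omega
        subst this; omega
    have hk1 : k + 1 < vals.length := by omega
    have h1 : vals[k + 1] ≤ vals[j] := by
      rcases Nat.lt_or_ge (k + 1) j with hlt | hge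
      · exact le_of_lt (hmono (k + 1) j hk1 hj hlt)
      · have : j = k + 1 := by omega
        subst this; exact le_refl _
    have h2 : vals[k] < vals[k + 1] := hmono k (k + 1) hk hk1 (by omega)
    refine ⟨by omega, ?_⟩
    have hc : (k : Int) + 1 = ((k + 1 : Nat) : Int) := by omega
    rw [hc, PySem.List.pyGetD_natCast, List.getD_eq_getElem _ _ hk1]
    omega
  · rintro ⟨hk0, heq⟩
    have hk1 : k + 1 < vals.length := by omega
    have hc : (k : Int) + 1 = ((k + 1 : Nat) : Int) := by omega
    rw [hc, PySem.List.pyGetD_natCast, List.getD_eq_getElem _ _ hk1] at heq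
    rw [← heq]; exact List.getElem_mem hk1

-- Membership in B's keeper set, characterised without indices.
lemma mem_keep_iff (l : List Int) (x : Int) :
    (x ∈ ((PySem.List.enumerate (PySem.List.sorted (PySem.Set.ofList l) (fun x => x) false)).filter (fun p =>
        p.1 == 0 || PySem.List.pyGetD (PySem.List.sorted (PySem.Set.ofList l) (fun x => x) false) (p.1 - 1) 0 != p.2 - 1 ||
        p.1 == ((PySem.List.sorted (PySem.Set.ofList l) (fun x => x) false).length : Int) - 1 ||
        PySem.List.pyGetD (PySem.List.sorted (PySem.Set.ofList l) (fun x => x) false) (p.1 + 1) 0 != p.2 + 1)).map (·.2))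
    ↔ (x ∈ l ∧ ((x - 1) ∉ l ∨ (x + 1) ∉ l)) := by
  set vals := PySem.List.sorted (PySem.Set.ofList l) (fun x => x) false with hv
  have hstrict : vals.Pairwise (· < ·) := PySem.List.sorted_ofList_pairwise_lt l
  have hmemv : ∀ y : Int, y ∈ vals ↔ y ∈ l := by
    intro y
    rw [hv, PySem.List.mem_sorted, PySem.Set.mem_ofList]
  constructor
  · intro hx
    simp only [List.mem_map, List.mem_filter] at hx
    obtain ⟨p, ⟨hpe, hpc⟩, hpx⟩ := hx
    obtain ⟨k, hk, hpk⟩ := (PySem.List.mem_enumerate_iff _ _ _).mp hpe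
    subst hpk
    simp only at hpx
    simp only [Bool.or_eq_true, beq_iff_eq, bne_iff_ne, ne_eq, zero_add] at hpc
    have hx1 : vals[k] = x := hpx
    refine ⟨(hmemv x).mp (hx1 ▸ List.getElem_mem hk), ?_⟩
    have hprev := prev_iff vals hstrict k hk
    have hnext := next_iff vals hstrict k hk
    rw [hx1] at hprev hnext
    rcases hpc with ((h0 | hp) | hlast) | hn
    · left; rw [← hmemv, hprev]
      have hk0 : k = 0 := by simpa using h0
      intro ⟨hne, _⟩; exact hne hk0
    · left; rw [← hmemv, hprev]
      intro ⟨_, heq⟩; exact hp (by rw [hx1]; exact heq)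
    · right; rw [← hmemv, hnext]
      have hkl : k = vals.length - 1 := by omega
      intro ⟨hne, _⟩; exact hne hkl
    · right; rw [← hmemv, hnext]
      intro ⟨_, heq⟩; exact hn (by rw [hx1]; exact heq)
  · rintro ⟨hxl, hside⟩
    obtain ⟨k, hk, hke⟩ := List.mem_iff_getElem.mp ((hmemv x).mpr hxl)
    simp only [List.mem_map, List.mem_filter]
    refine ⟨((0 : Int) + k, vals[k]), ⟨(PySem.List.mem_enumerate_iff _ _ _).mpr ⟨k, hk, rfl⟩, ?_⟩, hke⟩
    simp only [Bool.or_eq_true, beq_iff_eq, bne_iff_ne, ne_eq, zero_add]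
    have hprev := prev_iff vals hstrict k hk
    have hnext := next_iff vals hstrict k hk
    rw [hke] at hprev hnext
    rcases hside with hm | hm
    · rw [← hmemv, hprev] at hm
      by_cases h0 : k = 0
      · exact Or.inl (Or.inl (Or.inl (by simp [h0])))
      · refine Or.inl (Or.inl (Or.inr ?_))
        intro heq; rw [hke] at heq; exact hm ⟨h0, heq⟩
    · rw [← hmemv, hnext] at hm
      by_cases h0 : k = vals.length - 1
      · refine Or.inl (Or.inr ?_); omega
      · refine Or.inr ?_
        intro heq; rw [hke] at heq; exact hm ⟨h0, heq⟩

-- ===== VERDICT (by name: the statement is the Claim_ definition above) =====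
theorem head_tails_spec : Claim_equal_head_tails := by
  intro l _
  show head_tails l = head_tails_alt l
  rw [head_tails_eq_filter]
  unfold head_tails_alt
  simp only []
  apply List.filter_congr
  intro x hx
  rw [Bool.eq_iff_iff, PySem.Set.contains_iff, PySem.Set.mem_ofList, mem_keep_iff l x]
  simp only [Bool.or_eq_true, Bool.not_eq_eq_eq_not, Bool.not_true, decide_eq_false_iff_not]
  constructor
  · intro h; exact ⟨hx, h.symm⟩
  · intro h; exact h.2.symm
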